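-- pv_equiv track=rewrite | github.com/brandonvio/lvrgd-ai-notebooks | ib_insync/_lib.py | surrounding_values
-- ===== SOURCE A (Python) =====
-- def surrounding_values(val, count, nums):
--     """
--     Return n values above and below val from nums.
--     """
--
--     # Sort the list in ascending order
--     nums.sort()
--
--     # Find the index of the first value greater than val
--     index = 0
--     while index < len(nums) and nums[index] <= val:
--         index += 1
--
--     # Initialize result lists for values above and below val
--     above = []
--     below = []
--
--     # Collect n values above and below val
--     for i in range(count):
--         if index - i - 1 >= 0:
--             below.insert(0, nums[index - i - 1])
--         if index + i < len(nums):
--             above.append(nums[index + i])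
--
--     # Combine and return the result
--     return below + above
-- ===== SOURCE B (Python) =====
-- import bisect
--
--
-- def surrounding_values(val, count, nums):
--     """
--     Return count values above and below val from nums.
--     """
--     nums.sort()
--     index = bisect.bisect_right(nums, val)
--     count = max(count, 0)
--     below = nums[max(0, index - count):index]
--     above = nums[index:index + count]
--     return below + above
-- ===== Notes on version B (the rewrite author's own statement) =====
-- stated objective: simpler
-- what changed: Replaces the linear while-scan with bisect_right (binary search) and the per-element insert(0)/append loop over range(count) with two list slices around the insertion point.
import Mathlib
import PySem

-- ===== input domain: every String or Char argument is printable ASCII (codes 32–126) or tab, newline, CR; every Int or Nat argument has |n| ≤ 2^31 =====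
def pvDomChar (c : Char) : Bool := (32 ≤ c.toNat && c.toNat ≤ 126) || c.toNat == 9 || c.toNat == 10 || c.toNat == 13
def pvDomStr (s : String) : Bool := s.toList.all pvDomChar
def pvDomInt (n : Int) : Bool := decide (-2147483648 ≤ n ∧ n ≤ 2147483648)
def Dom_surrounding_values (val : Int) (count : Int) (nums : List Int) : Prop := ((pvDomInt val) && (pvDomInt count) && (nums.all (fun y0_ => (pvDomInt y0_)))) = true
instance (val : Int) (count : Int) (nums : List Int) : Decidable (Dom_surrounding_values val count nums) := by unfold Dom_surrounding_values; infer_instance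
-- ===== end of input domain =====

-- B replaces A's linear while-scan by bisect_right and the per-element insert/append loop by two
-- slices (simpler; same return value). Both Pythons sort `nums` in place; the equivalence proved
-- here is about the return value.

-- ===== PORT A =====
-- the while loop: `while index < len(nums) and nums[index] <= val: index += 1`
def svWhile (s : List Int) (val : Int) (index : Nat) : Nat :=
  if h : index < s.length then
    if s[index] ≤ val then svWhile s val (index + 1) else index
  else index
termination_by s.length - index

def surrounding_values (val : Int) (count : Int) (nums : List Int) : List Int :=
  let s := PySem.List.sorted nums (fun x => x)
  let index : Nat := svWhile s val 0
  -- for i in range(count): guarded insert(0, ·) / append; both indices are in range whenever the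
  -- guard holds (0 ≤ index-i-1 < index ≤ len, index+i < len), so pyGetD is exact here
  let st := (PySem.List.pyRange 0 count).foldl
    (fun (st : List Int × List Int) i =>
      let below := if 0 ≤ (index : Int) - i - 1 then
          PySem.List.pyGetD s ((index : Int) - i - 1) 0 :: st.1 else st.1
      let above := if (index : Int) + i < (s.length : Int) then
          st.2 ++ [PySem.List.pyGetD s ((index : Int) + i) 0] else st.2
      (below, above)) ([], [])
  st.1 ++ st.2

-- ===== PORT B =====
def surrounding_values_alt (val : Int) (count : Int) (nums : List Int) : List Int :=
  let s := PySem.List.sorted nums (fun x => x)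
  let index : Int := (PySem.List.bisectRight s val : Nat)
  let c := max count 0
  let below := PySem.List.slice s (some (max 0 (index - c))) (some index)
  let above := PySem.List.slice s (some index) (some (index + c))
  below ++ above

-- ===== PRECONDITION & SPEC =====
def Spec_surrounding_values (val : Int) (count : Int) (nums : List Int) (out : List Int) : Prop := out = surrounding_values_alt val count nums
instance (val : Int) (count : Int) (nums : List Int) (out : List Int) : Decidable (Spec_surrounding_values val count nums out) := by unfold Spec_surrounding_values; infer_instance

-- ===== CLAIM (what is proved, stated in full; the proofs are below) =====
def Claim_equal_surrounding_values : Prop := ∀ (val : Int) (count : Int) (nums : List Int), Dom_surrounding_values val count nums → Spec_surrounding_values val count nums (surrounding_values val count nums)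

-- ===== LEMMAS AND PROOFS =====

-- A's while loop lands exactly at bisect_right on a sorted list
lemma svWhile_eq_bisect (s : List Int) (val : Int) (h : s.Pairwise (· ≤ ·)) :
    ∀ n i, PySem.List.bisectRight s val - i = n → i ≤ PySem.List.bisectRight s val →
      svWhile s val i = PySem.List.bisectRight s val := by
  obtain ⟨hk, hle, hgt⟩ := PySem.List.bisectRight_spec s val h
  intro n
  induction n with
  | zero =>
    intro i h0 hi
    have hik : i = PySem.List.bisectRight s val := by omega
    subst hik
    rw [svWhile]
    split_ifs with h1 h2
    · exact absurd h2 (by exact not_le.mpr (hgt _ h1 le_rfl))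
    · rfl
    · rfl
  | succ n ih =>
    intro i h0 hi
    have hilt : i < PySem.List.bisectRight s val := by omega
    have hlen : i < s.length := by omega
    rw [svWhile]
    rw [dif_pos hlen, if_pos (hle i hlen hilt)]
    exact ih (i + 1) (by omega) (by omega)

-- the fold over range(c) builds exactly the two windows around k
lemma fold_windows (s : List Int) (k : Nat) (hk : k ≤ s.length) (c : Nat) :
    (List.range c).foldl
      (fun (st : List Int × List Int) (i : Nat) =>
        let below := if 0 ≤ (k : Int) - (i : Int) - 1 then
            PySem.List.pyGetD s ((k : Int) - (i : Int) - 1) 0 :: st.1 else st.1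
        let above := if (k : Int) + (i : Int) < (s.length : Int) then
            st.2 ++ [PySem.List.pyGetD s ((k : Int) + (i : Int)) 0] else st.2
        (below, above)) ([], [])
    = ((s.take k).drop (k - c), (s.drop k).take c) := by
  induction c with
  | zero => simp [List.drop_eq_nil_of_le (by simp : (s.take k).length ≤ k)]
  | succ c ih =>
    rw [List.range_succ, List.foldl_append, ih]
    simp only [List.foldl_cons, List.foldl_nil]
    rw [Prod.mk.injEq]
    constructor
    · -- below component
      by_cases hb : 0 ≤ (k : Int) - (c : Int) - 1
      · have hck : c < k := by omega
        have h1 : ((k : Int) - (c : Int) - 1) = ((k - c - 1 : Nat) : Int) := by omega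
        have h2 : k - c - 1 < (s.take k).length := by rw [List.length_take]; omega
        rw [if_pos hb, h1, PySem.List.pyGetD_natCast]
        have h3 : (s.take k).drop (k - c - 1) = (s.take k)[k - c - 1] :: (s.take k).drop (k - c) := by
          have h5 : k - c - 1 + 1 = k - c := by omega
          rw [List.drop_eq_getElem_cons h2, h5]
        have h4 : k - (c + 1) = k - c - 1 := by omega
        rw [h4, h3]
        congr 1
        rw [List.getElem_take]
        rw [List.getD_eq_getElem _ _ (by omega)]
      · have hck : k ≤ c := by omega
        rw [if_neg hb]
        congr 1
        omega
    · -- above component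
      by_cases ha : (k : Int) + (c : Int) < (s.length : Int)
      · have hc : c < s.length - k := by omega
        rw [if_pos ha, List.take_add_one]
        congr 1
        have h1 : ((k : Int) + (c : Int)) = ((k + c : Nat) : Int) := by omega
        rw [h1, PySem.List.pyGetD_natCast]
        have hlt : c < (s.drop k).length := by rw [List.length_drop]; omega
        have h2 : (s.drop k)[c]? = some ((s.drop k)[c]'hlt) := List.getElem?_eq_getElem hlt
        rw [h2]
        simp only [Option.toList_some]
        congr 1
        rw [List.getElem_drop, List.getD_eq_getElem _ _ (by omega)]
      · rw [if_neg ha, List.take_add_one]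
        have h2 : (s.drop k)[c]? = none := by
          rw [List.getElem?_eq_none]
          simp
          omega
        rw [h2]
        simp

-- ===== VERDICT (by name: the statement is the Claim_ definition above) =====
theorem surrounding_values_spec : Claim_equal_surrounding_values := by
  intro val count nums _
  unfold Spec_surrounding_values surrounding_values surrounding_values_alt
  dsimp only
  have hpw : (PySem.List.sorted nums (fun x => x)).Pairwise (· ≤ ·) :=
    PySem.List.sorted_pairwise nums (fun x => x)
  set s := PySem.List.sorted nums (fun x => x) with hs
  set k := PySem.List.bisectRight s val with hkdef
  have hk : k ≤ s.length := (PySem.List.bisectRight_spec s val hpw).1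
  have hwhile : svWhile s val 0 = k :=
    svWhile_eq_bisect s val hpw k 0 (by omega) (by omega)
  rw [hwhile]
  set c : Nat := count.toNat with hc
  have hmaxc : max count 0 = (c : Int) := by omega
  have hrange : PySem.List.pyRange 0 count = List.map (fun k : Nat => (k : Int)) (List.range c) := by
    by_cases hcn : 0 ≤ count
    · have : count = (c : Int) := by omega
      rw [this, PySem.List.pyRange_zero_natCast]
    · have h0 : c = 0 := by omega
      rw [h0]
      simp [PySem.List.pyRange]
      omega
  rw [hrange, List.foldl_map, fold_windows s k hk c]
  rw [hmaxc]
  have hbelow : max 0 ((k : Int) - (c : Int)) = ((k - c : Nat) : Int) := by omega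
  rw [hbelow, PySem.List.slice_natCast, PySem.List.slice_natCast_add]
  rw [List.drop_take]
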